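-- pv_equiv track=rewrite | github.com/GGTio/CyberSecuritySouthampton | Cryptography/coursework/cw/decipherTools.py | dict_cleaning
-- ===== SOURCE A (Python) =====
-- def dict_cleaning(dict):
--     list_to_del = []
--     for key in dict:
--         if dict[key] == 1 or dict[key] == 2 or dict[key] == 5 or dict[key] == 6 or dict[key] == 7 or dict[key] == 8 or dict[key] == 9:
--             list_to_del.append(key)
--     for pattern in list_to_del:
--         del dict[pattern]
--     return dict
-- ===== SOURCE B (Python) =====
-- def dict_cleaning(dict):
--     # Build an inverted index value -> [keys] in one pass, then delete the
--     # seven bad-value groups directly; no per-entry membership test.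
--     by_value = {}
--     for k, v in dict.items():
--         by_value.setdefault(v, []).append(k)
--     for bad in (1, 2, 5, 6, 7, 8, 9):
--         for key in by_value.get(bad, []):
--             del dict[key]
--     return dict
-- ===== Notes on version B (the rewrite author's own statement) =====
-- stated objective: alternative
-- what changed: A scans every entry testing its value against a seven-way or-chain and defers deletions to a key list; B instead builds an inverted index (value -> list of keys) in one grouping pass and then deletes exactly the seven bad-value groups, so no entry's value is ever tested against the bad set.
import Mathlib
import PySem

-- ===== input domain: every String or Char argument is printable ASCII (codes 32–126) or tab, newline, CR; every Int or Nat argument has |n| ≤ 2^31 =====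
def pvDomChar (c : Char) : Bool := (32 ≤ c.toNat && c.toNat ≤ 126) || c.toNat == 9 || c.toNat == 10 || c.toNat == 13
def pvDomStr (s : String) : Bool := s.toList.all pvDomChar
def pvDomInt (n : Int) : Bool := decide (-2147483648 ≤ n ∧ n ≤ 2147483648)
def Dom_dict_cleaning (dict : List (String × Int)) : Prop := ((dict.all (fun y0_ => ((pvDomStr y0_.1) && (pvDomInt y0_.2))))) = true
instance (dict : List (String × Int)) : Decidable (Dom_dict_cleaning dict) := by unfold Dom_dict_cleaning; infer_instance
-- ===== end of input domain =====

-- B replaces A's scan-every-entry-and-test-its-value pass with an inverted index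
-- (value -> keys) built in one grouping pass, then deletes the seven bad-value groups;
-- same in-place mutation of the caller's dict, same return value; objective: alternative.

-- ===== PORT A =====
-- `dict[key] == 1 or ... or dict[key] == 9` on the looked-up value
def pvBadA (v : Int) : Bool :=
  v == 1 || v == 2 || v == 5 || v == 6 || v == 7 || v == 8 || v == 9

def dict_cleaning (dict : List (String × Int)) : List (String × Int) :=
  let d := PySem.Dict.mk dict
  -- for key in dict: if dict[key] == 1 or ...: list_to_del.append(key)
  -- (dict[key] is d.getD key 0; the default is never used since key ∈ d.keys, so no KeyError)
  let listToDel : List String :=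
    d.keys.foldl (fun acc key => if pvBadA (d.getD key 0) then acc ++ [key] else acc) []
  -- for pattern in list_to_del: del dict[pattern]
  (listToDel.foldl (fun d2 pattern => d2.erase pattern) d).items

-- ===== PORT B =====
def dict_cleaning_alt (dict : List (String × Int)) : List (String × Int) :=
  -- by_value = {}; for k, v in dict.items(): by_value.setdefault(v, []).append(k)
  -- (setdefault(v, []).append(k) sets by_value[v] = by_value.get(v, []) + [k] in place = modify)
  let byValue : PySem.Dict Int (List String) :=
    dict.foldl (fun bv p => bv.modify p.2 [] (fun l => l ++ [p.1])) PySem.Dict.empty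
  -- for bad in (1,...,9): for key in by_value.get(bad, []): del dict[key]
  (([1, 2, 5, 6, 7, 8, 9] : List Int).foldl
      (fun d bad => (byValue.getD bad []).foldl (fun d2 key => d2.erase key) d)
      (PySem.Dict.mk dict)).items

-- ===== PRECONDITION & SPEC =====
-- Pre_ excludes association lists with duplicate keys: those do not represent a Python dict
-- (the dict constructor collapses them before A ever runs), so any behaviour on them is an
-- artefact of the list encoding, not of either program.
def Pre_dict_cleaning (dict : List (String × Int)) : Prop :=
  (dict.map Prod.fst).Nodup

instance (dict : List (String × Int)) : Decidable (Pre_dict_cleaning dict) := by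
  unfold Pre_dict_cleaning; infer_instance

def pvWitness_dict_cleaning : (List (String × Int)) := [("a", 1), ("b", 3), ("c", 7)]

def Spec_dict_cleaning (dict : List (String × Int)) (out : List (String × Int)) : Prop :=
  out = dict_cleaning_alt dict
instance (dict : List (String × Int)) (out : List (String × Int)) : Decidable (Spec_dict_cleaning dict out) := by unfold Spec_dict_cleaning; infer_instance

-- ===== CLAIM (what is proved, stated in full; the proofs are below) =====
def Claim_equal_dict_cleaning : Prop := ∀ (dict : List (String × Int)), Dom_dict_cleaning dict → Pre_dict_cleaning dict → Spec_dict_cleaning dict (dict_cleaning dict)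

-- ===== LEMMAS AND PROOFS =====

-- A's membership test (chain of ==) as list membership in the bad-value list.
theorem pvBadA_eq_contains (v : Int) :
    pvBadA v = (([1, 2, 5, 6, 7, 8, 9] : List Int).contains v) := by
  rw [List.contains_eq_mem, Bool.eq_iff_iff]
  simp only [pvBadA, Bool.or_eq_true, beq_iff_eq, decide_eq_true_iff, List.mem_cons,
    List.not_mem_nil, or_false]
  tauto

-- A's append-if loop over keys is a filter.
theorem pvFoldl_append_if {α : Type} (p : α → Bool) (l : List α) (acc : List α) :
    l.foldl (fun acc x => if p x then acc ++ [x] else acc) acc = acc ++ l.filter p := by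
  induction l generalizing acc with
  | nil => simp
  | cons x xs ih => by_cases h : p x <;> simp [h, ih]

-- erase on a literal dict filters the items list (definitional in PySem).
theorem pvErase_mk (l : List (String × Int)) (k : String) :
    (PySem.Dict.mk l).erase k = PySem.Dict.mk (l.filter (fun p => !(p.1 == k))) := rfl

-- A deletion loop removes exactly the entries whose key occurs in the list.
theorem pvFoldl_erase_items (L : List String) (l : List (String × Int)) :
    ((L.foldl (fun d k => d.erase k) (PySem.Dict.mk l)).items)
      = l.filter (fun p => !(L.contains p.1)) := by
  induction L generalizing l with
  | nil => simp
  | cons k ks ih =>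
    simp only [List.foldl_cons, pvErase_mk, ih, List.filter_filter]
    apply List.filter_congr
    intro p _
    by_cases h : p.1 = k <;> simp [h]

-- B's nested deletion loop (groups driven by the bad list) is one deletion loop
-- over the concatenation of the groups.
theorem pvNested_erase (bads : List Int) (g : Int → List String)
    (d : PySem.Dict String Int) :
    bads.foldl (fun d b => (g b).foldl (fun d2 k => d2.erase k) d) d
      = (bads.flatMap g).foldl (fun d2 k => d2.erase k) d := by
  induction bads generalizing d with
  | nil => rfl
  | cons b bs ih => simp [List.foldl_append, ih]

-- B's grouping pass: the index lists the keys of each value, in dict order.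
theorem pvGroup_getD (dict : List (String × Int)) (b : Int) :
    (dict.foldl (fun bv p => bv.modify p.2 [] (fun l => l ++ [p.1]))
        (PySem.Dict.empty : PySem.Dict Int (List String))).getD b []
      = (dict.filter (fun p => p.2 == b)).map Prod.fst := by
  have h := PySem.Dict.getD_foldl_modify_append
    (l := dict.map (fun p => (p.2, p.1)))
    (d := (PySem.Dict.empty : PySem.Dict Int (List String))) (c := b)
  rw [List.foldl_map] at h
  simpa [List.filter_map, Function.comp] using h

-- ===== VERDICT (by name: the statement is the Claim_ definition above) =====
theorem dict_cleaning_spec : Claim_equal_dict_cleaning := by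
  intro dict _ hpre
  unfold Spec_dict_cleaning dict_cleaning dict_cleaning_alt
  simp only [pvFoldl_append_if, List.nil_append, pvNested_erase, pvFoldl_erase_items,
    pvGroup_getD]
  apply List.filter_congr
  intro p hp
  have hval : (PySem.Dict.mk dict).getD p.1 0 = p.2 :=
    PySem.Dict.getD_of_mem_items (PySem.Dict.mk dict)
      (show (p.1, p.2) ∈ (PySem.Dict.mk dict).items from hp) hpre 0
  congr 1
  rw [Bool.eq_iff_iff, List.contains_eq_mem, List.contains_eq_mem,
    decide_eq_true_iff, decide_eq_true_iff]
  constructor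
  · -- A's key was listed for deletion → p.1 is in some bad-value group
    intro h
    rw [List.mem_filter] at h
    rw [hval, pvBadA_eq_contains, List.contains_eq_mem, decide_eq_true_iff] at h
    rcases h with ⟨-, hb⟩
    rw [List.mem_flatMap]
    exact ⟨p.2, hb, List.mem_map_of_mem (List.mem_filter.mpr ⟨hp, by simp⟩)⟩
  · -- p.1 in some bad-value group → A lists it (keys are unique, so the value matches)
    intro h
    rw [List.mem_flatMap] at h
    rcases h with ⟨b, hb, hk⟩
    rw [List.mem_map] at hk
    rcases hk with ⟨q, hq, hq1⟩
    rw [List.mem_filter] at hq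
    have hqp : q = p := List.inj_on_of_nodup_map hpre hq.1 hp hq1
    have hpb : p.2 = b := by rw [← hqp]; exact beq_iff_eq.mp hq.2
    rw [List.mem_filter]
    refine ⟨List.mem_map_of_mem hp, ?_⟩
    rw [hval, pvBadA_eq_contains, List.contains_eq_mem, decide_eq_true_iff, hpb]
    exact hb
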